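-- pv_equiv track=rewrite | github.com/patsmad/advent-of-code-2022 | day_6.py | find_unique_start
-- ===== SOURCE A (Python) =====
-- def remove_value(c_dict, value):
--     remaining_value = c_dict.pop(value)
--     if remaining_value > 1:
--         c_dict[value] = remaining_value - 1
--     return c_dict
--
-- def find_unique_start(data, unique_c):
--     i = 0
--     c_dict = {}
--     while len(c_dict) != unique_c:
--         c_dict[data[i]] = c_dict.get(data[i], 0) + 1
--         if i >= unique_c:
--             c_dict = remove_value(c_dict, data[i - unique_c])
--         i += 1
--     return i
-- ===== SOURCE B (Python) =====
-- def find_unique_start(data, unique_c):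
--     for j in range(len(data) - unique_c + 1):
--         if len(set(data[j:j + unique_c])) == unique_c:
--             return j + unique_c
--     raise ValueError("no run of distinct characters found")
-- ===== Notes on version B (the rewrite author's own statement) =====
-- stated objective: simpler
-- what changed: Replaces A's single-pass sliding window with an incrementally maintained count dictionary (insert/decrement/pop helper) by a brute-force scan over every start position j that recomputes len(set(data[j:j+unique_c])) from scratch for each candidate window and returns at the first distinct one.
import Mathlib
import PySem

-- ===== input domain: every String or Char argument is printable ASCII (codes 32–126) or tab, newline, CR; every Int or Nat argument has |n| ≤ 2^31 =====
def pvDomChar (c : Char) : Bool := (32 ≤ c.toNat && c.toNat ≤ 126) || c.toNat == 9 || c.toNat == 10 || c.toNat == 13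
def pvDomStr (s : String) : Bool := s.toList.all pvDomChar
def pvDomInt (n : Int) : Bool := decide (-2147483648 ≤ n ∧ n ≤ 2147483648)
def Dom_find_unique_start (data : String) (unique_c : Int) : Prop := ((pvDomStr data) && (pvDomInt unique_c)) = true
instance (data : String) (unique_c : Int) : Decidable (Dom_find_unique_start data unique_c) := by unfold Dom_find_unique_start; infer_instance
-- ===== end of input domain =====

-- B replaces A's incremental sliding-window count dictionary by a brute-force scan over
-- every start position, recomputing the window's distinct count from a fresh slice
-- (objective: simpler; not faster).

-- ===== PORT A =====
def remove_value (c_dict : PySem.Dict Char Int) (value : Char) : PySem.Dict Char Int :=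
  match c_dict.pop? value with
  | none => c_dict  -- Python raises KeyError here; unreachable under Pre_
  | some (remaining_value, d) =>
      if remaining_value > 1 then d.insert value (remaining_value - 1) else d

-- the while-loop of A; fuel only makes it total (the 0 case is never reached:
-- the loop stops, or data[i] raises, before i exceeds len(data))
def findLoopA (data : List Char) (unique_c : Int) : Nat → Nat → PySem.Dict Char Int → Int
  | 0, _, _ => 0
  | fuel+1, i, c_dict =>
    if (c_dict.size : Int) = unique_c then (i : Int)
    else
      match PySem.List.pyGet? data (i : Int) with
      | none => 0  -- Python raises IndexError; unreachable under Pre_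
      | some ch =>
        let d1 := c_dict.insert ch (c_dict.getD ch 0 + 1)
        if unique_c ≤ (i : Int) then
          match PySem.List.pyGet? data ((i : Int) - unique_c) with
          | none => 0  -- Python raises IndexError; unreachable under Pre_
          | some old => findLoopA data unique_c fuel (i+1) (remove_value d1 old)
        else findLoopA data unique_c fuel (i+1) d1

def find_unique_start (data : String) (unique_c : Int) : Int :=
  findLoopA data.toList unique_c (data.toList.length + 1) 0 PySem.Dict.empty

-- ===== PORT B =====
-- the for-loop of B over the list range(len(data) - unique_c + 1)
def findLoopB (data : List Char) (unique_c : Int) : List Int → Int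
  | [] => 0  -- Python raises ValueError here; unreachable under Pre_
  | j :: rest =>
    if ((PySem.Set.ofList (PySem.List.slice data (some j) (some (j + unique_c)))).length : Int) = unique_c
    then j + unique_c
    else findLoopB data unique_c rest

def find_unique_start_alt (data : String) (unique_c : Int) : Int :=
  findLoopB data.toList unique_c
    (PySem.List.pyRange 0 ((data.toList.length : Int) - unique_c + 1) 1)

-- ===== PRECONDITION & SPEC =====
-- Pre_ = exactly the inputs on which Python A returns: unique_c ≥ 0 (a negative
-- unique_c always ends in a KeyError/IndexError) and some window of unique_c
-- consecutive characters is duplicate-free (otherwise data[i] raises IndexError).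
def Pre_find_unique_start (data : String) (unique_c : Int) : Prop :=
  0 ≤ unique_c ∧ ∃ j, j < data.toList.length + 1 ∧
    j + unique_c.toNat ≤ data.toList.length ∧
    ((data.toList.drop j).take unique_c.toNat).Nodup

instance (data : String) (unique_c : Int) : Decidable (Pre_find_unique_start data unique_c) := by
  unfold Pre_find_unique_start; infer_instance

def pvWitness_find_unique_start : String × Int := ("abcad", 3)

def Spec_find_unique_start (data : String) (unique_c : Int) (out : Int) : Prop := out = find_unique_start_alt data unique_c
instance (data : String) (unique_c : Int) (out : Int) : Decidable (Spec_find_unique_start data unique_c out) := by unfold Spec_find_unique_start; infer_instance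

-- ===== CLAIM (what is proved, stated in full; the proofs are below) =====
def Claim_equal_find_unique_start : Prop := ∀ (data : String) (unique_c : Int), Dom_find_unique_start data unique_c → Pre_find_unique_start data unique_c → Spec_find_unique_start data unique_c (find_unique_start data unique_c)

-- ===== LEMMAS AND PROOFS =====

-- a list's distinct count equals its length exactly when it is duplicate-free
lemma setLen_eq_length_iff (w : List Char) :
    (PySem.Set.ofList w).length = w.length ↔ w.Nodup := by
  have hperm : (PySem.Set.ofList w).Perm w.dedup := by
    rw [List.perm_ext_iff_of_nodup (PySem.Set.nodup_ofList w) (List.nodup_dedup w)]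
    intro a
    rw [PySem.Set.mem_ofList, List.mem_dedup]
  rw [hperm.length_eq]
  constructor
  · intro h
    exact List.dedup_eq_self.mp ((List.dedup_sublist w).eq_of_length h)
  · intro h
    rw [List.dedup_eq_self.mpr h]

-- the abstraction relating A's count dictionary to the multiset of the current window
def DictRel (d : PySem.Dict Char Int) (w : List Char) : Prop :=
  d.keys.Nodup ∧ (∀ c, d.contains c = true ↔ c ∈ w) ∧ (∀ c, d.getD c 0 = (w.count c : Int))

lemma dictRel_empty : DictRel PySem.Dict.empty [] := by
  refine ⟨?_, ?_, ?_⟩ <;> simp [pysem, PySem.Dict.empty, PySem.Dict.keys]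

lemma dictRel_size {d : PySem.Dict Char Int} {w : List Char} (h : DictRel d w) :
    d.size = (PySem.Set.ofList w).length := by
  obtain ⟨hnd, hmem, -⟩ := h
  have hperm : d.keys.Perm (PySem.Set.ofList w) := by
    rw [List.perm_ext_iff_of_nodup hnd (PySem.Set.nodup_ofList w)]
    intro a
    rw [PySem.Set.mem_ofList, ← hmem a, ← PySem.Dict.contains_iff_mem_keys]
  have : d.size = d.keys.length := by
    simp [PySem.Dict.size, PySem.Dict.keys]
  rw [this, hperm.length_eq]

lemma dictRel_add {d : PySem.Dict Char Int} {w : List Char} (h : DictRel d w) (c : Char) :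
    DictRel (d.insert c (d.getD c 0 + 1)) (w ++ [c]) := by
  obtain ⟨hnd, hmem, hcnt⟩ := h
  refine ⟨PySem.Dict.nodup_keys_insert d c _ hnd, ?_, ?_⟩
  · intro x
    rw [PySem.Dict.contains_insert]
    simp only [List.mem_append, List.mem_singleton, Bool.or_eq_true, beq_iff_eq]
    rw [hmem x]; tauto
  · intro x
    rw [PySem.Dict.getD_insert]
    by_cases hx : x = c
    · subst hx
      simp [hcnt x, List.count_append]
    · have : c ≠ x := fun hh => hx hh.symm
      simp [hx, hcnt x, List.count_append, this]

lemma get?_erase (d : PySem.Dict Char Int) (k x : Char) :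
    (d.erase k).get? x = if x = k then none else d.get? x := by
  obtain ⟨items⟩ := d
  show (((items.filter (fun p => !(p.1 == k))).find? (fun p => p.1 == x)).map (·.2)) = _
  rw [List.find?_filter]
  split
  · next h =>
    subst h
    have : ∀ a ∈ items, ¬ (fun a => decide ((!(a.1 == x)) = true ∧ (a.1 == x) = true)) a = true := by
      intro a _; simp
    rw [List.find?_eq_none.mpr this]; rfl
  · next h =>
    have : (fun a => decide ((!((a:Char×Int).1 == k)) = true ∧ (a.1 == x) = true)) = (fun a => a.1 == x) := by
      funext a
      by_cases hx : a.1 = x <;> simp_all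
    rw [this]; rfl

lemma nodup_keys_erase (d : PySem.Dict Char Int) (k : Char) (h : d.keys.Nodup) :
    (d.erase k).keys.Nodup := by
  obtain ⟨items⟩ := d
  exact ((List.filter_sublist).map Prod.fst).nodup h

lemma contains_erase (d : PySem.Dict Char Int) (k x : Char) :
    (d.erase k).contains x = if x = k then false else d.contains x := by
  rw [PySem.Dict.contains_eq_isSome_get?, get?_erase, PySem.Dict.contains_eq_isSome_get?]
  split <;> rfl

lemma dictRel_remove {d : PySem.Dict Char Int} {y : Char} {rest : List Char}
    (h : DictRel d (y :: rest)) : DictRel (remove_value d y) rest := by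
  obtain ⟨hnd, hmem, hcnt⟩ := h
  have hy : d.contains y = true := (hmem y).mpr (List.mem_cons_self)
  rw [PySem.Dict.contains_eq_isSome_get?] at hy
  obtain ⟨r, hr⟩ : ∃ r, d.get? y = some r := Option.isSome_iff_exists.mp hy
  have hrc : r = (((y :: rest).count y : Nat) : Int) := by
    have := hcnt y
    rw [PySem.Dict.getD_eq_get?_getD, hr] at this
    simpa using this
  have hcy : (y :: rest).count y = rest.count y + 1 := by simp
  have hpop : remove_value d y = if r > 1 then (d.erase y).insert y (r - 1) else d.erase y := by
    unfold remove_value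
    rw [show d.pop? y = some (r, d.erase y) by simp [PySem.Dict.pop?, hr]]
  rw [hpop]
  split
  · next hgt =>
    have hyrest : y ∈ rest := by
      rw [hrc, hcy] at hgt
      have : 0 < rest.count y := by exact_mod_cast by push_cast at hgt ⊢; omega
      exact List.count_pos_iff.mp this
    refine ⟨PySem.Dict.nodup_keys_insert _ _ _ (nodup_keys_erase d y hnd), ?_, ?_⟩
    · intro x
      rw [PySem.Dict.contains_insert]
      by_cases hx : x = y
      · subst hx; simpa using hyrest
      · simp [contains_erase, hx, hmem x]
    · intro x
      rw [PySem.Dict.getD_insert]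
      by_cases hx : x = y
      · subst hx; rw [if_pos rfl, hrc, hcy]; push_cast; ring
      · rw [if_neg hx, PySem.Dict.getD_eq_get?_getD, get?_erase, if_neg hx,
            ← PySem.Dict.getD_eq_get?_getD, hcnt x]
        have : ¬ (y = x) := fun hh => hx hh.symm
        simp [this]
  · next hle =>
    have hnrest : y ∉ rest := by
      have : rest.count y = 0 := by
        rw [hrc, hcy] at hle
        exact_mod_cast by push_cast at hle ⊢; omega
      exact List.count_eq_zero.mp this
    refine ⟨nodup_keys_erase d y hnd, ?_, ?_⟩
    · intro x
      rw [contains_erase]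
      by_cases hx : x = y
      · subst hx; simp [hnrest]
      · rw [if_neg hx, hmem x]; simp [hx]
    · intro x
      rw [PySem.Dict.getD_eq_get?_getD, get?_erase]
      by_cases hx : x = y
      · subst hx
        rw [if_pos rfl]
        simp [List.count_eq_zero.mpr hnrest]
      · rw [if_neg hx, ← PySem.Dict.getD_eq_get?_getD, hcnt x]
        have : ¬ (y = x) := fun hh => hx hh.symm
        simp [this]

-- A's loop computes jstar + k, where jstar is the least duplicate-free window start
lemma loopA_val (xs : List Char) (k jstar : Nat)
    (hstar : jstar + k ≤ xs.length ∧ ((xs.drop jstar).take k).Nodup)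
    (hmin : ∀ j, j < jstar → ¬ (j + k ≤ xs.length ∧ ((xs.drop j).take k).Nodup)) :
    ∀ fuel i (d : PySem.Dict Char Int),
      xs.length + 1 - i ≤ fuel → i ≤ xs.length →
      DictRel d ((xs.take i).drop (i - k)) →
      (∀ j, j + k < i → ¬ ((xs.drop j).take k).Nodup) →
      findLoopA xs (k : Int) fuel i d = ((jstar : Int) + (k : Int)) := by
  intro fuel
  induction fuel with
  | zero => intro i d hfuel hle _ _; omega
  | succ fuel ih =>
    intro i d hfuel hle hrel hinv
    set w : List Char := (xs.take i).drop (i - k) with hw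
    have hwlen : w.length = i - (i - k) := by
      simp [hw, List.length_drop, List.length_take]; omega
    have hslen : (PySem.Set.ofList w).length ≤ w.length := PySem.Set.length_ofList_le w
    have hweq : k ≤ i → w = (xs.drop (i - k)).take k := by
      intro hki
      rw [hw, List.drop_take]
      congr 1; omega
    rw [findLoopA]
    rw [dictRel_size hrel]
    split
    · next hsz =>
      have hszn : (PySem.Set.ofList w).length = k := by exact_mod_cast hsz
      have hki : k ≤ i := by omega
      have hwk : w.length = k := by omega
      have hnod : w.Nodup := (setLen_eq_length_iff w).mp (by omega)
      have hgood : (i - k) + k ≤ xs.length ∧ ((xs.drop (i - k)).take k).Nodup := by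
        refine ⟨by omega, ?_⟩
        rw [← hweq hki]; exact hnod
      have h1 : ¬ (jstar < i - k) := by
        intro hlt
        exact hinv jstar (by omega) hstar.2
      have h2 : ¬ (i - k < jstar) := fun hlt => hmin _ hlt hgood
      have : i = jstar + k := by omega
      subst this; push_cast; ring
    · next hsz =>
      have hnotgood : k ≤ i → ¬ w.Nodup := by
        intro hki hnod
        have hwk : w.length = k := by omega
        exact hsz (by rw [(setLen_eq_length_iff w).mpr hnod, hwk])
      have hi : i < xs.length := by
        rcases Nat.lt_or_ge i xs.length with h | h
        · exact h
        · exfalso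
          have hieq : i = xs.length := by omega
          have hks : jstar + k ≤ i := by omega
          rcases Nat.lt_or_ge (jstar + k) i with hlt | hge
          · exact hinv jstar hlt hstar.2
          · have hjk : jstar = i - k := by omega
            have hki : k ≤ i := by omega
            apply hnotgood hki
            rw [hweq hki, ← hjk]; exact hstar.2
      rw [PySem.List.pyGet?_natCast, List.getElem?_eq_getElem hi]
      simp only []
      have hrel1 : DictRel (d.insert xs[i] (d.getD xs[i] 0 + 1)) (w ++ [xs[i]]) :=
        dictRel_add hrel xs[i]
      have hw1 : w ++ [xs[i]] = (xs.take (i+1)).drop (i - k) := by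
        rw [hw, List.take_add_one, List.getElem?_eq_getElem hi]
        rw [List.drop_append_of_le_length (by simp [List.length_take]; omega)]
        rfl
      have hinv' : ∀ j, j + k < i + 1 → ¬ ((xs.drop j).take k).Nodup := by
        intro j hj hnod
        rcases Nat.lt_or_ge (j + k) i with h | h
        · exact hinv j h hnod
        · have hji : j + k = i := by omega
          have hki : k ≤ i := by omega
          apply hnotgood hki
          rw [hweq hki, show i - k = j by omega]; exact hnod
      by_cases hiu : k ≤ i
      · rw [if_pos (by exact_mod_cast hiu)]
        have hsub : (i : Int) - (k : Int) = ((i - k : Nat) : Int) := by omega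
        rw [hsub, PySem.List.pyGet?_natCast, List.getElem?_eq_getElem (by omega)]
        simp only []
        have hhead : (i - k) < (xs.take (i+1)).length := by
          simp [List.length_take]; omega
        have hcons : (xs.take (i+1)).drop (i - k)
            = xs[i - k] :: (xs.take (i+1)).drop (i - k + 1) := by
          rw [List.drop_eq_getElem_cons hhead]
          congr 1
          exact (List.getElem_take).symm ▸ rfl
        have hrest : (xs.take (i+1)).drop (i - k + 1) = (xs.take (i+1)).drop ((i+1) - k) := by
          congr 1; omega
        have hform : w ++ [xs[i]] = xs[i - k] :: (xs.take (i+1)).drop ((i+1) - k) := by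
          rw [hw1, hcons, hrest]
        apply ih (i+1) _ (by omega) (by omega) _ hinv'
        exact dictRel_remove (hform ▸ hrel1)
      · rw [if_neg (by exact_mod_cast hiu)]
        apply ih (i+1) _ (by omega) (by omega) _ hinv'
        rw [show (i + 1) - k = i - k by omega, ← hw1]
        exact hrel1

-- B's scan over the remaining start positions also computes jstar + k
lemma loopB_val (xs : List Char) (k jstar : Nat)
    (hstar : jstar + k ≤ xs.length ∧ ((xs.drop jstar).take k).Nodup)
    (hmin : ∀ j, j < jstar → ¬ (j + k ≤ xs.length ∧ ((xs.drop j).take k).Nodup)) :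
    ∀ cnt j, jstar ≤ j + cnt → j ≤ jstar →
      findLoopB xs (k : Int) (PySem.List.pyRange (j : Int) ((xs.length : Int) - k + 1) 1)
        = ((jstar : Int) + (k : Int)) := by
  intro cnt
  induction cnt with
  | zero =>
    intro j h1 h2
    have hj : j = jstar := by omega
    subst hj
    rw [PySem.List.pyRange_one_cons (by omega : (j : Int) < (xs.length : Int) - k + 1)]
    rw [findLoopB]
    rw [PySem.List.slice_natCast_add]
    have hlen : ((xs.drop j).take k).length = k := by
      simp [List.length_take, List.length_drop]; omega
    rw [if_pos (by exact_mod_cast (by rw [(setLen_eq_length_iff _).mpr hstar.2, hlen] :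
      (PySem.Set.ofList ((xs.drop j).take k)).length = k))]
  | succ cnt ih =>
    intro j h1 h2
    rcases Nat.eq_or_lt_of_le h2 with hj | hj
    · subst hj
      rw [PySem.List.pyRange_one_cons (by omega : (j : Int) < (xs.length : Int) - k + 1)]
      rw [findLoopB]
      rw [PySem.List.slice_natCast_add]
      have hlen : ((xs.drop j).take k).length = k := by
        simp [List.length_take, List.length_drop]; omega
      rw [if_pos (by exact_mod_cast (by rw [(setLen_eq_length_iff _).mpr hstar.2, hlen] :
        (PySem.Set.ofList ((xs.drop j).take k)).length = k))]
    · have hjk : j + k ≤ xs.length := by omega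
      rw [PySem.List.pyRange_one_cons (by omega : (j : Int) < (xs.length : Int) - k + 1)]
      rw [findLoopB]
      rw [PySem.List.slice_natCast_add]
      have hlen : ((xs.drop j).take k).length = k := by
        simp [List.length_take, List.length_drop]; omega
      rw [if_neg ?_]
      · have : (j : Int) + 1 = ((j + 1 : Nat) : Int) := by push_cast; ring
        rw [this]
        exact ih (j + 1) (by omega) (by omega)
      · intro hc
        have hcn : (PySem.Set.ofList ((xs.drop j).take k)).length = k := by exact_mod_cast hc
        exact hmin j hj ⟨hjk, (setLen_eq_length_iff _).mp (by omega)⟩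

-- ===== VERDICT (by name: the statement is the Claim_ definition above) =====
theorem find_unique_start_spec : Claim_equal_find_unique_start := by
  intro data unique_c _ hpre
  obtain ⟨hnn, j0, -, hj0b, hj0n⟩ := hpre
  unfold Spec_find_unique_start find_unique_start find_unique_start_alt
  obtain ⟨u, rfl⟩ : ∃ u : Nat, unique_c = (u : Int) := ⟨unique_c.toNat, (Int.toNat_of_nonneg hnn).symm⟩
  set xs := data.toList with hxs
  rw [Int.toNat_natCast] at hj0b hj0n
  have hex : ∃ j, j + u ≤ xs.length ∧ ((xs.drop j).take u).Nodup := ⟨j0, hj0b, hj0n⟩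
  have hstar := Nat.find_spec hex
  have hmin : ∀ j, j < Nat.find hex → ¬ (j + u ≤ xs.length ∧ ((xs.drop j).take u).Nodup) :=
    fun j hj => Nat.find_min hex hj
  have hA := loopA_val xs u (Nat.find hex) hstar hmin (xs.length + 1) 0 PySem.Dict.empty
    (by omega) (by omega) (by simpa using dictRel_empty) (by omega)
  have hB := loopB_val xs u (Nat.find hex) hstar hmin (Nat.find hex) 0 (by omega) (by omega)
  rw [hA]
  rw [show ((0 : Nat) : Int) = (0 : Int) by simp] at hB
  rw [hB]
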